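-- pv_equiv track=rewrite | github.com/Orosz-Zzsombor/Vadasz_Denes_Verseny | verseny/main.py | ket_egyforma
-- ===== SOURCE A (Python) =====
-- def ket_egyforma(dobott_szamok):  # két egyforma pont számítása
--     legnagyobb_talalat = 0
--     for szam in dobott_szamok:
--         talalat = dobott_szamok.count(szam)
--         if talalat > 1:
--             if szam + szam > legnagyobb_talalat:
--                 legnagyobb_talalat = szam + szam
--     return legnagyobb_talalat
-- ===== SOURCE B (Python) =====
-- def ket_egyforma(dobott_szamok):
--     s = sorted(dobott_szamok, reverse=True)
--     for a, b in zip(s, s[1:]):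
--         if a == b:
--             return max(0, a + a)
--     return 0
-- ===== Notes on version B (the rewrite author's own statement) =====
-- stated objective: faster
-- what changed: Replaced the per-element .count rescan (quadratic) by one descending sort followed by a single adjacent-pair scan that finds the largest duplicated value, returning max(0, 2*value).
import Mathlib
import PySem

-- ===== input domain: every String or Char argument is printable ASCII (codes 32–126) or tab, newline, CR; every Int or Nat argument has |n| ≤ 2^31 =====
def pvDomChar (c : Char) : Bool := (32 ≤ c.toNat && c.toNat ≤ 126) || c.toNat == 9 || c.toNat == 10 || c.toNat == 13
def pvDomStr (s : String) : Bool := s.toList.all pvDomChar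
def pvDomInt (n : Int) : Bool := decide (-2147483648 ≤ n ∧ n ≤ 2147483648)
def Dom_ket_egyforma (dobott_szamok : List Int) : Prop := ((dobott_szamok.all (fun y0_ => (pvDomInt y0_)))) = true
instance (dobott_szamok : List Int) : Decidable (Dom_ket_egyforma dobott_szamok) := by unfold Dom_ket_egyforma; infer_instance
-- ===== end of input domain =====

-- B replaces A's quadratic rescan (.count inside the loop) by one descending sort plus a single
-- adjacent-pair scan; objective: faster (O(n log n) vs O(n^2)).

-- ===== PORT A =====
def ket_egyforma (dobott_szamok : List Int) : Int :=
  dobott_szamok.foldl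
    (fun legnagyobb_talalat szam =>
      if 1 < PySem.List.count dobott_szamok szam then
        if szam + szam > legnagyobb_talalat then szam + szam else legnagyobb_talalat
      else legnagyobb_talalat)
    0

-- ===== PORT B =====
-- the 'for a, b in zip(s, s[1:])' loop with early return, as structural recursion on s
def ketScan : List Int → Option Int
  | a :: b :: rest => if a = b then some a else ketScan (b :: rest)
  | _ => none

def ket_egyforma_alt (dobott_szamok : List Int) : Int :=
  let s := PySem.List.sorted dobott_szamok (fun x => x) true
  match ketScan s with
  | some a => max 0 (a + a)
  | none => 0

-- ===== PRECONDITION & SPEC =====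
def Spec_ket_egyforma (dobott_szamok : List Int) (out : Int) : Prop := out = ket_egyforma_alt dobott_szamok
instance (dobott_szamok : List Int) (out : Int) : Decidable (Spec_ket_egyforma dobott_szamok out) := by unfold Spec_ket_egyforma; infer_instance

-- ===== CLAIM (what is proved, stated in full; the proofs are below) =====
def Claim_equal_ket_egyforma : Prop := ∀ (dobott_szamok : List Int), Dom_ket_egyforma dobott_szamok → Spec_ket_egyforma dobott_szamok (ket_egyforma dobott_szamok)

-- ===== LEMMAS AND PROOFS =====

-- A's fold equals a max-fold over the duplicated elements of xs
theorem foldA_eq_filter (xs : List Int) :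
    ∀ (l : List Int) (acc : Int),
      l.foldl
        (fun legnagyobb_talalat szam =>
          if 1 < PySem.List.count xs szam then
            if szam + szam > legnagyobb_talalat then szam + szam else legnagyobb_talalat
          else legnagyobb_talalat) acc
      = (l.filter (fun x => decide (1 < PySem.List.count xs x))).foldl
          (fun a x => max a (x + x)) acc := by
  intro l
  induction l with
  | nil => intro acc; rfl
  | cons y t ih =>
    intro acc
    by_cases h : 1 < PySem.List.count xs y
    · have hacc : (if y + y > acc then y + y else acc) = max acc (y + y) := by
        split_ifs <;> omega
      simp only [List.foldl_cons, List.filter_cons, h, decide_true]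
      rw [hacc]
      exact ih _
    · simp only [List.foldl_cons, List.filter_cons, h, decide_false]
      exact ih acc

-- the max-fold is permutation invariant
theorem foldMax_perm {l₁ l₂ : List Int} (h : l₁.Perm l₂) (acc : Int) :
    l₁.foldl (fun a x => max a (x + x)) acc = l₂.foldl (fun a x => max a (x + x)) acc := by
  induction h generalizing acc with
  | nil => rfl
  | cons x _ ih => simp only [List.foldl_cons]; exact ih _
  | swap x y l =>
    simp only [List.foldl_cons]
    congr 1
    omega
  | trans _ _ ih₁ ih₂ => exact (ih₁ acc).trans (ih₂ acc)

-- the max-fold is constant when every contribution is below the accumulator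
theorem foldMax_const (l : List Int) (acc : Int) (h : ∀ x ∈ l, x + x ≤ acc) :
    l.foldl (fun a x => max a (x + x)) acc = acc := by
  induction l generalizing acc with
  | nil => rfl
  | cons y t ih =>
    simp only [List.foldl_cons]
    have hy := h y (by simp)
    have hm : max acc (y + y) = acc := by omega
    rw [hm]
    exact ih acc (fun x hx => h x (by simp [hx]))

-- core: on a descending list, the max-fold over duplicates equals the adjacent scan
theorem core (s : List Int) (hs : s.Pairwise (fun a b => b ≤ a)) :
    (s.filter (fun x => decide (1 < s.count x))).foldl (fun a x => max a (x + x)) 0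
      = (match ketScan s with
         | some a => max 0 (a + a)
         | none => 0) := by
  induction s using ketScan.induct with
  | case1 a rest =>
    -- adjacent duplicate found: a is the largest element of the list
    simp only [ketScan]
    have hcount : 1 < (a :: a :: rest).count a := by
      simp
    rw [List.filter_cons_of_pos (by simp)]
    simp only [List.foldl_cons]
    apply foldMax_const
    intro x hx
    have hx' : x ∈ a :: rest := List.mem_of_mem_filter hx
    have hle : x ≤ a := by
      rcases List.mem_cons.mp hx' with rfl | hx''
      · exact le_refl x
      · exact (List.pairwise_cons.mp hs).1 x (List.mem_cons_of_mem a hx'')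
    omega
  | case2 a b rest hab ih =>
    -- a ≠ b : a occurs exactly once, drop it on both sides
    simp only [ketScan, if_neg hab]
    have hpw := List.pairwise_cons.mp hs
    have hba : b < a := lt_of_le_of_ne (hpw.1 b (by simp)) (fun h => hab h.symm)
    have hnotmem : a ∉ b :: rest := by
      intro hmem
      rcases List.mem_cons.mp hmem with h | h
      · omega
      · have := (List.pairwise_cons.mp hpw.2).1 a h
        omega
    have hca : (a :: b :: rest).count a = 1 := by
      simp [List.count_eq_zero_of_not_mem hnotmem]
    rw [List.filter_cons_of_neg (by simp [hca])]
    have hfe : (b :: rest).filter (fun x => decide (1 < (a :: b :: rest).count x))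
        = (b :: rest).filter (fun x => decide (1 < (b :: rest).count x)) := by
      apply List.filter_congr
      intro x hx
      have hax : ¬ a = x := by
        intro h; exact hnotmem (h ▸ hx)
      simp [List.count_cons, hax]
    rw [hfe]
    exact ih hpw.2
  | case3 t h =>
    -- [] or a singleton: no duplicate possible
    rcases t with _ | ⟨a, _ | ⟨b, r⟩⟩
    · rfl
    · simp [ketScan, List.count_cons]
    · exact (h a b r rfl).elim

-- ===== VERDICT (by name: the statement is the Claim_ definition above) =====
theorem ket_egyforma_spec : Claim_equal_ket_egyforma := by
  intro xs _
  unfold Spec_ket_egyforma ket_egyforma ket_egyforma_alt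
  set s := PySem.List.sorted xs (fun x => x) true with hsdef
  have hperm : s.Perm xs := PySem.List.sorted_perm xs (fun x => x) true
  have hpw : s.Pairwise (fun a b => b ≤ a) := by
    simpa using PySem.List.sorted_pairwise_rev xs (fun x => x)
  rw [foldA_eq_filter xs xs 0]
  have hcnt : ∀ x, PySem.List.count xs x = s.count x := by
    intro x
    rw [PySem.List.count_eq]
    exact (hperm.count_eq x).symm
  have hfiltperm : (xs.filter (fun x => decide (1 < PySem.List.count xs x))).Perm
      (s.filter (fun x => decide (1 < s.count x))) := by
    have := hperm.filter (fun x => decide (1 < PySem.List.count xs x))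
    have h2 : s.filter (fun x => decide (1 < PySem.List.count xs x))
        = s.filter (fun x => decide (1 < s.count x)) := by
      apply List.filter_congr; intro x _; rw [hcnt]
    exact (h2 ▸ this).symm
  rw [foldMax_perm hfiltperm 0, core s hpw]
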